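-- pv_equiv track=rewrite | github.com/stolenwise/python-data-structures-exercise | python-ds-practice/34_same_frequency/same_frequency.py | same_frequency
-- ===== SOURCE A (Python) =====
-- def same_frequency(num1, num2):
--     """Do these nums have same frequencies of digits?
--
--         >>> same_frequency(551122, 221515)
--         True
--
--         >>> same_frequency(321142, 3212215)
--         False
--
--         >>> same_frequency(1212, 2211)
--         True
--     """
--     string1 = str(num1)
--     string2 = str(num2)
--
--     if len(string1) != len(string2):
--         return False
--
--
--     count1 = {}
--     count2 = {}
--
--     for digit in string1:
--         count1[digit] = count1.get(digit, 0) + 1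
--
--     for digit in string2:
--         count2[digit] = count2.get(digit, 0) + 1
--
--     return count1 == count2
-- ===== SOURCE B (Python) =====
-- def same_frequency(num1, num2):
--     """Do these nums have same frequencies of digits?"""
--     return sorted(str(num1)) == sorted(str(num2))
-- ===== Notes on version B (the rewrite author's own statement) =====
-- stated objective: simpler
-- what changed: B replaces the length guard and the two frequency dictionaries with a one-line sort-and-compare of the digit strings (multiset equality via sorted equality).
import Mathlib
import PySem

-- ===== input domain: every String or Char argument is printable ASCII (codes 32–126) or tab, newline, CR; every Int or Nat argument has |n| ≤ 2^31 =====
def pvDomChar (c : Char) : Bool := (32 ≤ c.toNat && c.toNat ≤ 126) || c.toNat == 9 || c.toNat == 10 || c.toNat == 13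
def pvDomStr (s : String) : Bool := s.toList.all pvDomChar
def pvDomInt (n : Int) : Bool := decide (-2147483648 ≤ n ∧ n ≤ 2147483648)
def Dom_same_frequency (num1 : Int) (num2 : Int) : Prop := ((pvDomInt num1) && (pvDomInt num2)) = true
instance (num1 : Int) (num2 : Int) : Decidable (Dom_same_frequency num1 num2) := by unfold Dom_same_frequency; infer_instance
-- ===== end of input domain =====

-- B replaces A's length guard and two count dictionaries by sorting both digit strings and comparing (same return value; simpler).


-- ===== PORT A =====
-- Python's '==' on dicts ignores insertion order: equal size and every item of d1 found in d2 (keys are unique).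
def pyDictEq (d1 d2 : PySem.Dict Char Int) : Bool :=
  d1.size == d2.size && d1.items.all (fun p => d2.get? p.1 == some p.2)

def same_frequency (num1 : Int) (num2 : Int) : Bool :=
  let string1 := PySem.Int.toChars num1
  let string2 := PySem.Int.toChars num2
  if string1.length ≠ string2.length then false
  else
    -- count[digit] = count.get(digit, 0) + 1, folded over the string
    let count1 := string1.foldl (fun d x => d.insert x (d.getD x 0 + 1)) PySem.Dict.empty
    let count2 := string2.foldl (fun d x => d.insert x (d.getD x 0 + 1)) PySem.Dict.empty
    pyDictEq count1 count2

-- ===== PORT B =====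
def same_frequency_alt (num1 : Int) (num2 : Int) : Bool :=
  PySem.List.sorted (PySem.Int.toChars num1) (fun c => c) false
    == PySem.List.sorted (PySem.Int.toChars num2) (fun c => c) false

-- ===== PRECONDITION & SPEC =====
def Spec_same_frequency (num1 : Int) (num2 : Int) (out : Bool) : Prop := out = same_frequency_alt num1 num2
instance (num1 : Int) (num2 : Int) (out : Bool) : Decidable (Spec_same_frequency num1 num2 out) := by unfold Spec_same_frequency; infer_instance

-- ===== CLAIM (what is proved, stated in full; the proofs are below) =====
def Claim_equal_same_frequency : Prop := ∀ (num1 : Int) (num2 : Int), Dom_same_frequency num1 num2 → Spec_same_frequency num1 num2 (same_frequency num1 num2)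

-- ===== LEMMAS AND PROOFS =====

theorem get?_counter_eq_some (l : List Char) (k : Char) (hk : k ∈ l) :
    (PySem.Dict.counter l).get? k = some ((l.count k : Int)) :=
  (PySem.Dict.get?_eq_some_iff_mem_items _ k _ (PySem.Dict.nodup_keys_counter l)).2
    (by rw [PySem.Dict.items_counter]
        exact List.mem_map.2 ⟨k, (PySem.Set.mem_ofList l k).2 hk, rfl⟩)

theorem mem_of_get?_counter_eq_some (l : List Char) (k : Char) (v : Int)
    (h : (PySem.Dict.counter l).get? k = some v) : k ∈ l := by
  rw [PySem.Dict.get?_eq_some_iff_mem_items _ k v (PySem.Dict.nodup_keys_counter l),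
      PySem.Dict.items_counter] at h
  obtain ⟨a, ha, hav⟩ := List.mem_map.1 h
  obtain ⟨rfl, -⟩ := Prod.mk.injEq .. ▸ hav
  exact (PySem.Set.mem_ofList l a).1 ha

theorem pyDictEq_counter_iff (l1 l2 : List Char) :
    pyDictEq (PySem.Dict.counter l1) (PySem.Dict.counter l2) = true ↔ l1.Perm l2 := by
  rw [pyDictEq, Bool.and_eq_true, beq_iff_eq, List.all_eq_true]
  constructor
  · rintro ⟨hsize, hall⟩
    have hitem : ∀ k ∈ l1, (k, (l1.count k : Int)) ∈ (PySem.Dict.counter l1).items := by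
      intro k hk
      rw [PySem.Dict.items_counter]
      exact List.mem_map.2 ⟨k, (PySem.Set.mem_ofList l1 k).2 hk, rfl⟩
    have hget : ∀ k ∈ l1, (PySem.Dict.counter l2).get? k = some ((l1.count k : Int)) := by
      intro k hk
      have := hall _ (hitem k hk)
      simpa using this
    have hsub : PySem.Set.ofList l1 ⊆ PySem.Set.ofList l2 := by
      intro k hk
      exact (PySem.Set.mem_ofList l2 k).2
        (mem_of_get?_counter_eq_some l2 k _ (hget k ((PySem.Set.mem_ofList l1 k).1 hk)))
    have hlen : (PySem.Dict.counter l1).size = (PySem.Set.ofList l1).length := by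
      simp [PySem.Dict.size, PySem.Dict.items_counter]
    have hlen2 : (PySem.Dict.counter l2).size = (PySem.Set.ofList l2).length := by
      simp [PySem.Dict.size, PySem.Dict.items_counter]
    have hperm : (PySem.Set.ofList l1).Perm (PySem.Set.ofList l2) :=
      (List.subperm_of_subset (PySem.Set.nodup_ofList l1) hsub).perm_of_length_le (by omega)
    refine List.perm_iff_count.mpr (fun a => ?_)
    by_cases ha : a ∈ l1
    · have := PySem.Dict.getD_of_get?_eq_some (PySem.Dict.counter l2) 0 (hget a ha)
      rw [PySem.Dict.getD_counter] at this
      exact_mod_cast this.symm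
    · have ha2 : a ∉ l2 := by
        intro h2
        exact ha ((PySem.Set.mem_ofList l1 a).1
          (hperm.mem_iff.2 ((PySem.Set.mem_ofList l2 a).2 h2)))
      rw [List.count_eq_zero_of_not_mem ha, List.count_eq_zero_of_not_mem ha2]
  · intro hp
    have hmem : ∀ a : Char, a ∈ PySem.Set.ofList l1 ↔ a ∈ PySem.Set.ofList l2 := by
      intro a
      rw [PySem.Set.mem_ofList, PySem.Set.mem_ofList]; exact hp.mem_iff
    have hperm : (PySem.Set.ofList l1).Perm (PySem.Set.ofList l2) :=
      (List.subperm_of_subset (PySem.Set.nodup_ofList l1) (fun a ha => (hmem a).1 ha)).antisymm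
        (List.subperm_of_subset (PySem.Set.nodup_ofList l2) (fun a ha => (hmem a).2 ha))
    constructor
    · simp [PySem.Dict.size, PySem.Dict.items_counter, hperm.length_eq]
    · intro p hpmem
      rw [PySem.Dict.items_counter] at hpmem
      obtain ⟨k, hk, rfl⟩ := List.mem_map.1 hpmem
      have hk2 : k ∈ l2 := hp.mem_iff.1 ((PySem.Set.mem_ofList l1 k).1 hk)
      show ((PySem.Dict.counter l2).get? k == some ((l1.count k : Int))) = true
      rw [get?_counter_eq_some l2 k hk2, hp.count_eq k]
      simp

theorem sorted_id_eq_iff (l1 l2 : List Char) :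
    PySem.List.sorted l1 (fun c => c) false = PySem.List.sorted l2 (fun c => c) false ↔ l1.Perm l2 := by
  constructor
  · intro h
    exact ((PySem.List.sorted_perm l1 (fun c => c) false).symm.trans
      (h ▸ PySem.List.sorted_perm l2 (fun c => c) false))
  · intro hp
    exact (PySem.List.sorted_id_eq_of_perm_of_pairwise l2 (PySem.List.sorted l1 (fun c => c) false)
      ((PySem.List.sorted_perm l1 (fun c => c) false).trans hp)
      (PySem.List.sorted_pairwise l1 (fun c => c))).symm

-- ===== VERDICT (by name: the statement is the Claim_ definition above) =====
theorem same_frequency_spec : Claim_equal_same_frequency := by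
  intro num1 num2 _
  unfold Spec_same_frequency same_frequency same_frequency_alt
  simp only [PySem.Dict.foldl_insert_getD_add_one_eq_counter]
  set l1 := PySem.Int.toChars num1
  set l2 := PySem.Int.toChars num2
  by_cases hp : l1.Perm l2
  · have hlen : l1.length = l2.length := hp.length_eq
    simp [hlen, (pyDictEq_counter_iff l1 l2).2 hp, (sorted_id_eq_iff l1 l2).2 hp]
  · have h1 : pyDictEq (PySem.Dict.counter l1) (PySem.Dict.counter l2) ≠ true := by
      intro h; exact hp ((pyDictEq_counter_iff l1 l2).1 h)
    have h2 : PySem.List.sorted l1 (fun c => c) false ≠ PySem.List.sorted l2 (fun c => c) false := by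
      intro h; exact hp ((sorted_id_eq_iff l1 l2).1 h)
    by_cases hlen : l1.length = l2.length <;> simp [hlen, h1, h2]
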